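-- pv_equiv track=rewrite | github.com/pypi-data/pypi-mirror-321 | packages/tesis-tn/tesis_tn-0.3-py3-none-any.whl/tesis_tn/main.py | particle_filter
-- ===== SOURCE A (Python) =====
-- def particle_filter(states, particle_list):
--     filtered_grid = []
--     row_len = len(states[0])
--     for row in states:
--         filtered_row = [0]*row_len
--         for particle in particle_list:
--             id, domain_i, middle, domain_j, shift, temporal_period, decays = particle
--             temp = domain_i*2 + middle + domain_j*2
--             temp_2 = domain_i + middle + domain_j
--             temp_len = len(temp)
--             temp_len_2 = len(temp_2)
--             d_i = len(domain_i)
--             i=0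
--             while i <= row_len - temp_len:
--                 if row[i:i+temp_len] == temp:
--                     for j in range(temp_len_2):
--                         filtered_row[i+d_i+j] = 1
--                     i += temp_len
--                 else:
--                     i += 1
--         filtered_grid.append(filtered_row)
--
--     return filtered_grid
-- ===== SOURCE B (Python) =====
-- def particle_filter(states, particle_list):
--     row_len = len(states[0])
--     # precompute, per particle: the pattern, its failure (border) table, and the marked span
--     compiled = []
--     for (_id, domain_i, middle, domain_j, _shift, _temporal_period, _decays) in particle_list:
--         pat = domain_i * 2 + middle + domain_j * 2
--         L = len(pat)
--         # border table: f[q] = length of the longest proper border of pat[:q],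
--         # built by the classic linear prefix-function recurrence
--         f = [0] * (L + 1)
--         t = 0
--         for q in range(1, L):
--             while t > 0 and pat[t] != pat[q]:
--                 t = f[t]
--             t = t + 1 if pat[t] == pat[q] else 0
--             f[q + 1] = t
--         compiled.append((pat, f, len(domain_i), len(domain_i) + len(middle) + len(domain_j)))
--     grid = []
--     for row in states:
--         r = row[:row_len]
--         n_r = len(r)
--         out = [0] * row_len
--         for pat, f, d_i, span in compiled:
--             L = len(pat)
--             p0 = pat[0]
--             q = 0  # automaton state: chars of pat currently matched
--             k = 0
--             while k < n_r:
--                 if q == 0: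
--                     # zero-state fast path: jump to the next occurrence of pat[0]
--                     try:
--                         k = r.index(p0, k)
--                     except ValueError:
--                         break
--                     q = 1  # r[k] == p0
--                 else:
--                     c = r[k]
--                     while q > 0 and pat[q] != c:
--                         q = f[q]
--                     q = q + 1 if pat[q] == c else 0
--                 if q == L:  # occurrence ends at k; mark its middle span, restart (non-overlap)
--                     s = k + 1 - L
--                     for j in range(span):
--                         out[s + d_i + j] = 1
--                     q = 0
--                 k += 1
--         grid.append(out)
--     return grid
-- ===== Notes on version B (the rewrite author's own statement) =====
-- stated objective: faster
-- what changed: B replaces A's naive scan (a fresh length-L slice comparison at every position, restarting after each mismatch) by a KMP failure-function automaton: per particle a border table built once by the linear prefix-function recurrence, per row a single left-to-right pass that keeps the matched-prefix state (with a zero-state jump to the next occurrence of the pattern's first symbol), marking the middle span and resetting on each full match.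
import Mathlib
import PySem

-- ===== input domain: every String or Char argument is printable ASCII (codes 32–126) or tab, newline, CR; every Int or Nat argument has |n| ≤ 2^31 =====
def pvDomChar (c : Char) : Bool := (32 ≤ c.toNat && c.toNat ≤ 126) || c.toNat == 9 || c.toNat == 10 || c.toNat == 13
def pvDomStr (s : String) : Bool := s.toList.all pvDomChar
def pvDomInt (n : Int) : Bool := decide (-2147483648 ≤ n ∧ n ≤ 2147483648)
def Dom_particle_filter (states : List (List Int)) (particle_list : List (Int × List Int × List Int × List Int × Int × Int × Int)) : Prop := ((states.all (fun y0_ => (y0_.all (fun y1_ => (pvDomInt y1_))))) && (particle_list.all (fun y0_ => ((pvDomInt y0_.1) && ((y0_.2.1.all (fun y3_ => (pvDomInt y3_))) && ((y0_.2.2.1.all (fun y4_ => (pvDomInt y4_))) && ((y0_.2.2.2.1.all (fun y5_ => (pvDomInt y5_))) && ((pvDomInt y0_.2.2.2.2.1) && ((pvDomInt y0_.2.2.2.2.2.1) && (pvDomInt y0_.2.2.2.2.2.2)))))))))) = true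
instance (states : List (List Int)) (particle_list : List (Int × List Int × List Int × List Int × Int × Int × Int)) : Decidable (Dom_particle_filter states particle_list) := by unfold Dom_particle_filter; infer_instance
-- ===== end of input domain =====

-- B replaces A's naive scan (a fresh length-L slice comparison at every position) by a KMP-style
-- failure-function automaton: per particle a precomputed border table, per row one left-to-right
-- pass keeping the matched-prefix state, marking and resetting on each full match.
-- Return-value equivalence only (neither implementation mutates its arguments).

-- ===== PORT A =====
-- 'for j in range(temp_len_2): filtered_row[i+d_i+j] = 1'
def pvMarkA (fr : List Int) (s : Int) (n : Int) : List Int :=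
  (PySem.List.pyRange 0 n 1).foldl (fun acc j => acc.set (s + j).toNat 1) fr

-- the 'while i <= row_len - temp_len' loop; fuel = row_len+1 bounds its iterations whenever
-- temp is nonempty (under Pre_); Python diverges on an empty temp, which Pre_ excludes
def pvScanA (row temp : List Int) (d_i tl2 : Int) (row_len : Nat) :
    Nat → Int → List Int → List Int
  | 0, _, fr => fr
  | fuel+1, i, fr =>
    if i ≤ (row_len : Int) - (temp.length : Int) then
      if PySem.List.slice row (some i) (some (i + (temp.length : Int))) = temp then
        pvScanA row temp d_i tl2 row_len fuel (i + (temp.length : Int)) (pvMarkA fr (i + d_i) tl2)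
      else
        pvScanA row temp d_i tl2 row_len fuel (i + 1) fr
    else fr

def particle_filter (states : List (List Int)) (particle_list : List (Int × List Int × List Int × List Int × Int × Int × Int)) : List (List Int) :=
  let row_len : Nat := ((PySem.List.pyGet? states 0).getD []).length  -- len(states[0]); IndexError on [] excluded by Pre_
  states.map (fun row =>
    particle_list.foldl (fun fr p =>
      let temp := p.2.1 ++ p.2.1 ++ p.2.2.1 ++ p.2.2.2.1 ++ p.2.2.2.1
      let tl2 : Int := ((p.2.1 ++ p.2.2.1 ++ p.2.2.2.1).length : Int)
      pvScanA row temp (p.2.1.length : Int) tl2 row_len (row_len + 1) 0 fr)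
      (List.replicate row_len 0))

-- ===== PORT B =====
-- 'for j in range(span): out[s + d_i + j] = 1'  (indices are in range, so List.set is exact)
def pvMarkB (out : List Int) (s n : Nat) : List Int :=
  (List.range n).foldl (fun o j => o.set (s + j) 1) out

-- 'while q > 0 and pat[q] != c: q = f[q]'; fuel = q bounds the iterations (f[q] < q);
-- q < len(pat) throughout, so pat.getD q 0 is exactly Python's pat[q]
def pvChain (pat : List Int) (fTab : List Nat) (c : Int) : Nat → Nat → Nat
  | 0, q => q
  | fuel+1, q => if 0 < q ∧ ¬ pat.getD q 0 = c then pvChain pat fTab c fuel (fTab.getD q 0) else q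

-- 'f = [0]*(L+1); t = 0; for q in range(1, L): while t > 0 and pat[t] != pat[q]: t = f[t];
--  t = t+1 if pat[t] == pat[q] else 0; f[q+1] = t' — range(1, L) is List.range' 1 (L-1)
-- (exact: empty when L ≤ 1); all list indices are in range, so getD/set are exact
def pvFTabB (pat : List Int) : List Nat :=
  ((List.range' 1 (pat.length - 1)).foldl (fun ft q =>
    let t1 := pvChain pat ft.1 (pat.getD q 0) ft.2 ft.2
    let t2 := if pat.getD t1 0 = pat.getD q 0 then t1 + 1 else 0
    (ft.1.set (q + 1) t2, t2))
    (List.replicate (pat.length + 1) 0, 0)).1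

-- 'while k < n_r: …' — fuel = len(r) bounds the iterations (k strictly increases);
-- 'r.index(pat[0], k)' (first index ≥ k holding pat[0], ValueError = none) is ported as
-- index? on r.drop k shifted by k; r[k] is r.getD k 0 (k < len(r) under the guard);
-- on q == L mark s = k+1-L (k+1 ≥ L there, so Nat subtraction is exact) and reset q to 0
def pvRunB (pat : List Int) (fTab : List Nat) (d_i span : Nat) (r : List Int) :
    Nat → Nat → Nat → List Int → List Int
  | 0, _, _, out => out
  | fuel+1, k, q, out =>
    if k < r.length then
      if q = 0 then
        match (PySem.List.index? (r.drop k) (pat.getD 0 0)).map (· + k) with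
        | none => out
        | some k' =>
          if 1 = pat.length then
            pvRunB pat fTab d_i span r fuel (k' + 1) 0 (pvMarkB out (k' + 1 - pat.length + d_i) span)
          else
            pvRunB pat fTab d_i span r fuel (k' + 1) 1 out
      else
        let c := r.getD k 0
        let q1 := pvChain pat fTab c q q
        let q2 := if pat.getD q1 0 = c then q1 + 1 else 0
        if q2 = pat.length then
          pvRunB pat fTab d_i span r fuel (k + 1) 0 (pvMarkB out (k + 1 - pat.length + d_i) span)
        else
          pvRunB pat fTab d_i span r fuel (k + 1) q2 out
    else out

def particle_filter_alt (states : List (List Int)) (particle_list : List (Int × List Int × List Int × List Int × Int × Int × Int)) : List (List Int) :=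
  let row_len : Nat := ((PySem.List.pyGet? states 0).getD []).length  -- len(states[0])
  let compiled := particle_list.map (fun p =>
    let pat := p.2.1 ++ p.2.1 ++ p.2.2.1 ++ p.2.2.2.1 ++ p.2.2.2.1
    (pat, pvFTabB pat, p.2.1.length, p.2.1.length + p.2.2.1.length + p.2.2.2.1.length))
  states.map (fun row =>
    let r := row.take row_len  -- row[:row_len], exact for this nonnegative in-order slice
    compiled.foldl (fun out pc => pvRunB pc.1 pc.2.1 pc.2.2.1 pc.2.2.2 r r.length 0 0 out)
      (List.replicate row_len 0))

-- ===== PRECONDITION & SPEC =====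
-- Pre_ excludes exactly the inputs where Python A does not return: states = [] (IndexError on
-- states[0]) and any particle whose three pattern parts are all empty (the while loop then
-- advances by 0 and A diverges).
def Pre_particle_filter (states : List (List Int)) (particle_list : List (Int × List Int × List Int × List Int × Int × Int × Int)) : Prop :=
  states ≠ [] ∧ ∀ p ∈ particle_list, p.2.1 ++ p.2.2.1 ++ p.2.2.2.1 ≠ ([] : List Int)
instance (states : List (List Int)) (particle_list : List (Int × List Int × List Int × List Int × Int × Int × Int)) : Decidable (Pre_particle_filter states particle_list) := by unfold Pre_particle_filter; infer_instance

def pvWitness_particle_filter : List (List Int) × (List (Int × List Int × List Int × List Int × Int × Int × Int)) :=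
  ([[1, 0, 1, 0, 1, 0]], [(0, [1], [0], [1], 0, 0, 0)])

def Spec_particle_filter (states : List (List Int)) (particle_list : List (Int × List Int × List Int × List Int × Int × Int × Int)) (out : List (List Int)) : Prop := out = particle_filter_alt states particle_list
instance (states : List (List Int)) (particle_list : List (Int × List Int × List Int × List Int × Int × Int × Int)) (out : List (List Int)) : Decidable (Spec_particle_filter states particle_list out) := by unfold Spec_particle_filter; infer_instance

-- ===== CLAIM (what is proved, stated in full; the proofs are below) =====
def Claim_equal_particle_filter : Prop := ∀ (states : List (List Int)) (particle_list : List (Int × List Int × List Int × List Int × Int × Int × Int)), Dom_particle_filter states particle_list → Pre_particle_filter states particle_list → Spec_particle_filter states particle_list (particle_filter states particle_list)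

-- ===== LEMMAS AND PROOFS =====

-- proof-side: the border (failure) table by its specification — pvBord pat q is the
-- greatest p < q with pat.take p a suffix of pat.take q — and the table as a map
def pvBord (pat : List Int) (q : Nat) : Nat :=
  ((List.range q).filter (fun p => pat.take p == (pat.take q).drop (q - p))).foldl max 0

def pvFTab (pat : List Int) : List Nat :=
  (List.range (pat.length + 1)).map (pvBord pat)

-- the common reference: the structural greedy scan both sides are reduced to
def pvNaive (pat : List Int) (d_i span : Nat) : List Int → Nat → List Int → List Int
  | [], _, out => out
  | c :: t, k, out =>
    if h : pat ≠ [] ∧ pat.isPrefixOf (c :: t) then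
      pvNaive pat d_i span ((c :: t).drop pat.length) (k + pat.length) (pvMarkB out (k + d_i) span)
    else pvNaive pat d_i span t (k + 1) out
  termination_by t _ _ => t.length
  decreasing_by
  all_goals simp only [List.length_drop, List.length_cons]
  all_goals try omega
  all_goals (have hl : 0 < pat.length := List.length_pos_iff.mpr h.1; omega)

-- the automaton's intended state: length of the longest prefix of pat that is a suffix of u
def pvM (pat u : List Int) : Nat := Nat.findGreatest (fun p => pat.take p <:+ u) pat.length

-- proof-side reference: the plain per-char automaton scan (no zero-state jump)
def pvRunR (pat : List Int) (fTab : List Nat) (d_i span : Nat) :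
    List Int → Nat → Nat → List Int → List Int
  | [], _, _, out => out
  | c :: rest, k, q, out =>
    let q1 := pvChain pat fTab c q q
    let q2 := if pat.getD q1 0 = c then q1 + 1 else 0
    if q2 = pat.length then
      pvRunR pat fTab d_i span rest (k+1) 0 (pvMarkB out (k + 1 - pat.length + d_i) span)
    else
      pvRunR pat fTab d_i span rest (k+1) q2 out

theorem pvMark_eq (fr : List Int) (s n : Nat) :
    pvMarkA fr (s : Int) (n : Int) = pvMarkB fr s n := by
  unfold pvMarkA pvMarkB
  rw [PySem.List.pyRange_zero_natCast, List.foldl_map]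
  apply PySem.List.foldl_congr_mem
  intro acc j _
  have h : ((s : Int) + (j : Int)).toNat = s + j := by omega
  rw [h]

theorem pvNaive_match (pat : List Int) (d s : Nat) (t : List Int) (k : Nat) (out : List Int)
    (hne : pat ≠ []) (hp : pat <+: t) :
    pvNaive pat d s t k out
      = pvNaive pat d s (t.drop pat.length) (k + pat.length) (pvMarkB out (k + d) s) := by
  cases t with
  | nil => exact absurd (List.prefix_nil.mp hp) hne
  | cons c t' =>
    rw [pvNaive]
    rw [dif_pos ⟨hne, (List.isPrefixOf_iff_prefix).mpr hp⟩]

theorem pvNaive_step (pat : List Int) (d s : Nat) (c : Int) (t : List Int) (k : Nat) (out : List Int)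
    (hp : ¬ pat <+: (c :: t)) :
    pvNaive pat d s (c :: t) k out = pvNaive pat d s t (k + 1) out := by
  rw [pvNaive]
  rw [dif_neg (by simp [List.isPrefixOf_iff_prefix]; intro _; exact hp)]

theorem pvNaive_nomatch (pat : List Int) (d s : Nat) :
    ∀ (t : List Int) (k : Nat) (out : List Int), (∀ j, ¬ pat <+: t.drop j) →
    pvNaive pat d s t k out = out := by
  intro t
  induction t with
  | nil => intro k out _; rw [pvNaive]
  | cons c t' ih =>
    intro k out h
    rw [pvNaive_step pat d s c t' k out (h 0), ih]
    intro j
    exact h (j + 1)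

theorem pvNaive_skip (pat : List Int) (d s : Nat) :
    ∀ (w1 w2 : List Int) (k : Nat) (out : List Int),
    (∀ j, j < w1.length → ¬ pat <+: ((w1 ++ w2).drop j)) →
    pvNaive pat d s (w1 ++ w2) k out = pvNaive pat d s w2 (k + w1.length) out := by
  intro w1
  induction w1 with
  | nil => intro w2 k out _; simp
  | cons c w1' ih =>
    intro w2 k out h
    rw [List.cons_append, pvNaive_step pat d s c (w1' ++ w2) k out (h 0 (by simp))]
    rw [ih w2 (k+1) out (fun j hj => h (j+1) (by simpa using hj))]
    simp only [List.length_cons]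
    ring_nf

-- occurrences translated between prefix-of-drop and suffix-of-take form
theorem pvOcc_suffix_take (pat t : List Int) (j : Nat) (hp : pat <+: t.drop j) :
    pat <:+ t.take (j + pat.length) := by
  rw [List.take_add]
  exact ⟨t.take j, by rw [← List.prefix_iff_eq_take.mp hp]⟩

theorem pvScanA_past (row temp : List Int) (d_i tl2 : Int) (row_len : Nat) (htemp : temp ≠ []) :
    ∀ (fuel : Nat) (i : Int) (fr : List Int), (row.length : Int) ≤ i → 0 ≤ i →
    pvScanA row temp d_i tl2 row_len fuel i fr = fr := by
  intro fuel
  induction fuel with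
  | zero => intro i fr _ _; rfl
  | succ fuel ih =>
    intro i fr hlen h0
    lift i to ℕ using h0 with n
    rw [pvScanA]
    by_cases hg : (n : Int) ≤ (row_len : Int) - (temp.length : Int)
    · rw [if_pos hg]
      have hsl : PySem.List.slice row (some (n : Int)) (some ((n : Int) + (temp.length : Int)))
          = (row.drop n).take temp.length := by
        rw [show ((n : Int) + (temp.length : Int)) = ((n + temp.length : Nat) : Int) by push_cast; ring]
        rw [PySem.List.slice_natCast]
        congr 1
        omega
      have hdz : row.drop n = [] := List.drop_eq_nil_iff.mpr (by exact_mod_cast hlen)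
      rw [if_neg (by rw [hsl, hdz]; simpa using (Ne.symm htemp))]
      rw [show ((n : Int) + 1) = ((n + 1 : Nat) : Int) by push_cast; ring]
      exact ih _ fr (by push_cast; omega) (by positivity)
    · rw [if_neg hg]

theorem pvScanA_eq_naive (row temp : List Int) (dN spanN : Nat) (row_len : Nat)
    (htemp : temp ≠ []) :
    ∀ (fuel : Nat) (i : Nat) (fr : List Int), row_len + 1 ≤ fuel + i →
    pvScanA row temp (dN : Int) (spanN : Int) row_len fuel (i : Int) fr
      = pvNaive temp dN spanN ((row.take row_len).drop i) i fr := by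
  have hL1 : 0 < temp.length := List.length_pos_iff.mpr htemp
  intro fuel
  induction fuel with
  | zero =>
    intro i fr hfuel
    have : (row.take row_len).drop i = [] := by
      apply List.drop_eq_nil_iff.mpr
      rw [List.length_take]
      omega
    rw [this, pvNaive]
    rfl
  | succ fuel ih =>
    intro i fr hfuel
    rw [pvScanA]
    by_cases hg : (i : Int) ≤ (row_len : Int) - (temp.length : Int)
    · have hgN : i + temp.length ≤ row_len := by push_cast at hg; omega
      rw [if_pos hg]
      have hsl : PySem.List.slice row (some (i : Int)) (some ((i : Int) + (temp.length : Int)))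
          = (row.drop i).take temp.length := by
        rw [show ((i : Int) + (temp.length : Int)) = ((i + temp.length : Nat) : Int) by push_cast; ring]
        rw [PySem.List.slice_natCast]
        congr 1
        omega
      have hiff : ((row.drop i).take temp.length = temp) ↔ temp <+: ((row.take row_len).drop i) := by
        rw [List.drop_take]
        rw [List.prefix_take_iff]
        constructor
        · intro h
          refine ⟨List.prefix_iff_eq_take.mpr h.symm, by omega⟩
        · intro h
          exact (List.prefix_iff_eq_take.mp h.1).symm
      by_cases hm : PySem.List.slice row (some (i : Int)) (some ((i : Int) + (temp.length : Int))) = temp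
      · rw [if_pos hm]
        have hpre : temp <+: ((row.take row_len).drop i) := hiff.mp (by rw [← hsl]; exact hm)
        rw [pvNaive_match temp dN spanN _ i fr htemp hpre]
        rw [List.drop_drop]
        rw [show ((i : Int) + (temp.length : Int)) = ((i + temp.length : Nat) : Int) by push_cast; ring]
        rw [show ((i : Int) + (dN : Int)) = ((i + dN : Nat) : Int) by push_cast; ring]
        rw [pvMark_eq]
        rw [ih (i + temp.length) _ (by omega)]
      · rw [if_neg hm]
        have hnp : ¬ temp <+: ((row.take row_len).drop i) := by
          rw [← hiff, ← hsl]; exact hm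
        cases hrd : (row.take row_len).drop i with
        | nil =>
          rw [pvNaive]
          have hrlen : (row.length : Int) ≤ ((i + 1 : Nat) : Int) := by
            have := List.drop_eq_nil_iff.mp hrd
            rw [List.length_take] at this
            push_cast
            omega
          rw [show ((i : Int) + 1) = ((i + 1 : Nat) : Int) by push_cast; ring]
          exact pvScanA_past row temp (dN : Int) (spanN : Int) row_len htemp fuel _ fr hrlen (by positivity)
        | cons x t =>
          rw [pvNaive_step temp dN spanN x t i fr (hrd ▸ hnp)]
          have ht : (row.take row_len).drop (i + 1) = t := by
            have : (row.take row_len).drop (i + 1) = ((row.take row_len).drop i).drop 1 := by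
              rw [List.drop_drop]
            rw [this, hrd]
            rfl
          rw [show ((i : Int) + 1) = ((i + 1 : Nat) : Int) by push_cast; ring]
          rw [ih (i + 1) fr (by omega), ht]
    · rw [if_neg hg]
      refine (pvNaive_nomatch temp dN spanN _ i fr ?_).symm
      intro j hpj
      have hl := hpj.length_le
      simp only [List.drop_drop, List.length_drop, List.length_take] at hl
      push_cast at hg
      omega

-- border-table characterisation
theorem pvFoldlMax_mem (l : List Nat) : ∀ a : Nat, l.foldl max a = a ∨ l.foldl max a ∈ l := by
  induction l with
  | nil => intro a; left; rfl
  | cons b l ih =>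
    intro a
    simp only [List.foldl_cons]
    rcases ih (max a b) with h | h
    · rcases max_choice a b with h2 | h2 <;> rw [h, h2]
      · left; rfl
      · right; simp
    · right; simp [h]

theorem pvBord_lt (pat : List Int) (q : Nat) (hq : 0 < q) : pvBord pat q < q := by
  unfold pvBord
  rcases pvFoldlMax_mem ((List.range q).filter (fun p => pat.take p == (pat.take q).drop (q - p))) 0 with h | h
  · omega
  · have := List.mem_range.mp (List.mem_filter.mp h).1
    omega

theorem pvBord_border (pat : List Int) (q : Nat) (hq : q ≤ pat.length) :
    pat.take (pvBord pat q) <:+ pat.take q := by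
  rcases pvFoldlMax_mem ((List.range q).filter (fun p => pat.take p == (pat.take q).drop (q - p))) 0 with h | h
  · unfold pvBord
    rw [h]
    simp
  · have h1 := List.mem_range.mp (List.mem_filter.mp h).1
    have h2 : pat.take (pvBord pat q) = (pat.take q).drop (q - pvBord pat q) :=
      beq_iff_eq.mp (List.mem_filter.mp h).2
    rw [List.suffix_iff_eq_drop]
    rw [List.length_take, List.length_take]
    have : min (pvBord pat q) pat.length = pvBord pat q := by
      have : pvBord pat q < q := h1
      omega
    rw [this, Nat.min_eq_left hq]
    exact h2

theorem pvBord_max (pat : List Int) (q : Nat) (hq : q ≤ pat.length)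
    (p : Nat) (hp : p < q) (hs : pat.take p <:+ pat.take q) : p ≤ pvBord pat q := by
  unfold pvBord
  apply (PySem.List.le_foldl_max _ 0).2
  apply List.mem_filter.mpr
  refine ⟨List.mem_range.mpr hp, ?_⟩
  apply beq_iff_eq.mpr
  have h2 := List.suffix_iff_eq_drop.mp hs
  rwa [show (List.take q pat).length - (List.take p pat).length = q - p by
    simp [List.length_take]; omega] at h2

theorem pvFTab_getD (pat : List Int) (q : Nat) (hq : q ≤ pat.length) :
    (pvFTab pat).getD q 0 = pvBord pat q := by
  unfold pvFTab
  exact PySem.List.getD_map_range (pvBord pat) (pat.length + 1) q 0 (by omega)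

theorem pvChain_spec (pat : List Int) (c : Int) :
    ∀ (q fuel : Nat), q ≤ fuel → q < pat.length →
    pvChain pat (pvFTab pat) c fuel q ≤ q ∧
    pat.take (pvChain pat (pvFTab pat) c fuel q) <:+ pat.take q ∧
    (pat.getD (pvChain pat (pvFTab pat) c fuel q) 0 = c ∨ pvChain pat (pvFTab pat) c fuel q = 0) ∧
    (∀ p, p ≤ q → pat.take p <:+ pat.take q → pat.getD p 0 = c →
      p ≤ pvChain pat (pvFTab pat) c fuel q) := by
  intro q
  induction q using Nat.strong_induction_on with
  | _ q ih =>
    intro fuel hfuel hq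
    cases fuel with
    | zero =>
      have hq0 : q = 0 := by omega
      subst hq0
      refine ⟨le_rfl, List.suffix_rfl, Or.inr rfl, ?_⟩
      intro p hp _ _
      simp only [pvChain]
      omega
    | succ fuel =>
      rw [pvChain]
      by_cases h : 0 < q ∧ ¬ pat.getD q 0 = c
      · rw [if_pos h, pvFTab_getD pat q (le_of_lt hq)]
        have hb : pvBord pat q < q := pvBord_lt pat q h.1
        have C := ih (pvBord pat q) hb fuel (by omega) (lt_trans hb hq)
        refine ⟨le_trans C.1 (le_of_lt hb), C.2.1.trans (pvBord_border pat q (le_of_lt hq)),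
          C.2.2.1, ?_⟩
        intro p hpq hsuf hgc
        rcases lt_or_eq_of_le hpq with hlt | heq
        · have hp1 : p ≤ pvBord pat q := pvBord_max pat q (le_of_lt hq) p hlt hsuf
          rcases lt_or_eq_of_le hp1 with hlt2 | rfl
          · refine C.2.2.2 p (le_of_lt hlt2) ?_ hgc
            exact List.suffix_of_suffix_length_le hsuf (pvBord_border pat q (le_of_lt hq))
              (by rw [List.length_take, List.length_take]; omega)
          · exact C.2.2.2 _ le_rfl List.suffix_rfl hgc
        · subst heq; exact absurd hgc h.2
      · rw [if_neg h]
        refine ⟨le_rfl, List.suffix_rfl, ?_, fun p hp _ _ => hp⟩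
        rcases Nat.eq_zero_or_pos q with h0 | h0
        · exact Or.inr h0
        · refine Or.inl ?_
          by_contra hc
          exact h ⟨h0, hc⟩

-- pvM basics
theorem pvM_le (pat u : List Int) : pvM pat u ≤ pat.length := Nat.findGreatest_le _

theorem pvM_suffix (pat u : List Int) : pat.take (pvM pat u) <:+ u := by
  unfold pvM
  refine Nat.findGreatest_spec (P := fun p => pat.take p <:+ u) (m := 0) (Nat.zero_le _) ?_
  simp

theorem pvM_max (pat u : List Int) (p : Nat) (hp : p ≤ pat.length)
    (hs : pat.take p <:+ u) : p ≤ pvM pat u := Nat.le_findGreatest hp hs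

theorem pvM_nil (pat : List Int) (hne : pat ≠ []) : pvM pat [] = 0 := by
  have h := pvM_suffix pat []
  have := List.suffix_nil.mp h
  rcases List.take_eq_nil_iff.mp this with h0 | h0
  · exact h0
  · exact absurd h0 hne

theorem pvSuffix_snoc_iff (v u : List Int) (x c : Int) :
    (v ++ [x]) <:+ (u ++ [c]) ↔ v <:+ u ∧ x = c := by
  constructor
  · rintro ⟨w, hw⟩
    rw [← List.append_assoc] at hw
    have := List.append_inj' hw (by simp)
    exact ⟨⟨w, this.1⟩, by simpa using this.2⟩
  · rintro ⟨⟨w, hw⟩, rfl⟩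
    exact ⟨w, by rw [← List.append_assoc, hw]⟩

theorem pvTake_succ (pat : List Int) (p : Nat) (hp : p < pat.length) :
    pat.take (p + 1) = pat.take p ++ [pat.getD p 0] := by
  rw [List.take_add_one]
  congr 1
  rw [List.getElem?_eq_getElem hp]
  simp [List.getD, List.getElem?_eq_getElem hp]

theorem pvP_succ_iff (pat : List Int) (p : Nat) (hp : p < pat.length) (u : List Int) (c : Int) :
    pat.take (p + 1) <:+ (u ++ [c]) ↔ pat.getD p 0 = c ∧ pat.take p <:+ u := by
  rw [pvTake_succ pat p hp, pvSuffix_snoc_iff]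
  tauto

theorem pvStep_M (pat : List Int) (u : List Int) (c : Int)
    (hq : pvM pat u < pat.length) :
    (if pat.getD (pvChain pat (pvFTab pat) c (pvM pat u) (pvM pat u)) 0 = c
      then pvChain pat (pvFTab pat) c (pvM pat u) (pvM pat u) + 1 else 0)
      = pvM pat (u ++ [c]) := by
  have C := pvChain_spec pat c (pvM pat u) (pvM pat u) le_rfl hq
  have bridge : ∀ p, p ≤ pvM pat u →
      (pat.take p <:+ pat.take (pvM pat u) ↔ pat.take p <:+ u) := by
    intro p hp
    constructor
    · intro hs; exact hs.trans (pvM_suffix pat u)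
    · intro hs
      exact List.suffix_of_suffix_length_le hs (pvM_suffix pat u)
        (by rw [List.length_take, List.length_take]; have := pvM_le pat u; omega)
  have hq1le : pvChain pat (pvFTab pat) c (pvM pat u) (pvM pat u) ≤ pvM pat u := C.1
  by_cases h1 : pat.getD (pvChain pat (pvFTab pat) c (pvM pat u) (pvM pat u)) 0 = c
  · rw [if_pos h1]
    apply le_antisymm
    · apply pvM_max _ _ _ (by omega)
      rw [pvP_succ_iff pat _ (by omega) u c]
      exact ⟨h1, (bridge _ hq1le).mp C.2.1⟩
    · rcases Nat.eq_zero_or_pos (pvM pat (u ++ [c])) with h0 | h0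
      · omega
      · obtain ⟨p, hp⟩ : ∃ p, pvM pat (u ++ [c]) = p + 1 := ⟨pvM pat (u ++ [c]) - 1, by omega⟩
        have hm := pvM_suffix pat (u ++ [c])
        have hmle := pvM_le pat (u ++ [c])
        rw [hp] at hm hmle ⊢
        have hsp := (pvP_succ_iff pat p (by omega) u c).mp hm
        have hple : p ≤ pvM pat u := pvM_max pat u p (by omega) hsp.2
        have := C.2.2.2 p hple ((bridge p hple).mpr hsp.2) hsp.1
        omega
  · rw [if_neg h1]
    have hq10 : pvChain pat (pvFTab pat) c (pvM pat u) (pvM pat u) = 0 :=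
      C.2.2.1.resolve_left h1
    symm
    rcases Nat.eq_zero_or_pos (pvM pat (u ++ [c])) with h0 | h0
    · exact h0
    · exfalso
      obtain ⟨p, hp⟩ : ∃ p, pvM pat (u ++ [c]) = p + 1 := ⟨pvM pat (u ++ [c]) - 1, by omega⟩
      have hm := pvM_suffix pat (u ++ [c])
      have hmle := pvM_le pat (u ++ [c])
      rw [hp] at hm hmle
      have hsp := (pvP_succ_iff pat p (by omega) u c).mp hm
      have hple : p ≤ pvM pat u := pvM_max pat u p (by omega) hsp.2
      have hpq1 := C.2.2.2 p hple ((bridge p hple).mpr hsp.2) hsp.1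
      rw [hq10] at hpq1
      have hp0 : p = 0 := by omega
      rw [hp0] at hsp
      rw [hq10] at h1
      exact h1 hsp.1

theorem pvRunR_eq_naive (pat : List Int) (hne : pat ≠ []) (d s : Nat) :
    ∀ (v u : List Int) (k0 : Nat) (out : List Int),
    pvM pat u < pat.length →
    (∀ m : Nat, ¬ pat <:+ u.take m) →
    pvRunR pat (pvFTab pat) d s v (k0 + u.length) (pvM pat u) out
      = pvNaive pat d s (u ++ v) k0 out := by
  intro v
  induction v with
  | nil =>
    intro u k0 out hq hnocc
    rw [pvRunR, List.append_nil]
    refine (pvNaive_nomatch pat d s u k0 out ?_).symm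
    intro j hpj
    exact hnocc (j + pat.length) (pvOcc_suffix_take pat u j hpj)
  | cons c v' ih =>
    intro u k0 out hq hnocc
    simp only [pvRunR]
    rw [pvStep_M pat u c hq]
    by_cases hq2 : pvM pat (u ++ [c]) = pat.length
    · rw [if_pos hq2]
      have hsfull : pat <:+ (u ++ [c]) := by
        have h := pvM_suffix pat (u ++ [c])
        rwa [hq2, List.take_length] at h
      have hLle : pat.length ≤ u.length + 1 := by simpa using hsfull.length_le
      have hseg : (u ++ [c]).drop (u.length + 1 - pat.length) = pat := by
        have h := List.suffix_iff_eq_drop.mp hsfull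
        simp only [List.length_append, List.length_cons, List.length_nil] at h
        exact h.symm
      have hdecomp : u ++ c :: v'
          = ((u ++ [c]).take (u.length + 1 - pat.length)) ++ (pat ++ v') := by
        have h1 : u ++ [c] = ((u ++ [c]).take (u.length + 1 - pat.length)) ++ pat := by
          conv_lhs => rw [← List.take_append_drop (u.length + 1 - pat.length) (u ++ [c])]
          rw [hseg]
        calc u ++ c :: v' = (u ++ [c]) ++ v' := by simp
          _ = (((u ++ [c]).take (u.length + 1 - pat.length)) ++ pat) ++ v' := by
                conv_lhs => rw [h1]
          _ = _ := by rw [List.append_assoc]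
      have hlen_take : ((u ++ [c]).take (u.length + 1 - pat.length)).length
          = u.length + 1 - pat.length := by
        simp [List.length_take]
      rw [hdecomp, pvNaive_skip pat d s _ _ k0 out ?_]
      · rw [hlen_take]
        rw [pvNaive_match pat d s (pat ++ v') _ out hne (List.prefix_append pat v')]
        rw [List.drop_left]
        have h0 : pvM pat [] = 0 := pvM_nil pat hne
        have ihm := ih [] (k0 + (u.length + 1 - pat.length) + pat.length)
          (pvMarkB out (k0 + (u.length + 1 - pat.length) + d) s)
          (by rw [h0]; exact List.length_pos_iff.mpr hne)
          (by intro m hm; simp at hm; exact hne hm)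
        rw [h0] at ihm
        simp only [List.length_nil, Nat.add_zero, List.nil_append] at ihm
        rw [show k0 + u.length + 1 - pat.length + d
            = k0 + (u.length + 1 - pat.length) + d by omega,
          show k0 + u.length + 1 = k0 + (u.length + 1 - pat.length) + pat.length by omega]
        exact ihm
      · intro j hj
        rw [hlen_take] at hj
        intro hp
        have hocc := pvOcc_suffix_take pat _ j ((hdecomp ▸ hp : pat <+: (u ++ c :: v').drop j))
        have hjL : j + pat.length ≤ u.length := by omega
        rw [List.take_append_of_le_length hjL] at hocc
        exact hnocc (j + pat.length) hocc
    · rw [if_neg hq2]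
      have hqlt : pvM pat (u ++ [c]) < pat.length := lt_of_le_of_ne (pvM_le _ _) hq2
      have hnocc' : ∀ m, ¬ pat <:+ (u ++ [c]).take m := by
        intro m hm
        by_cases hmu : m ≤ u.length
        · rw [List.take_append_of_le_length hmu] at hm
          exact hnocc m hm
        · have hall : (u ++ [c]).take m = u ++ [c] := by
            apply List.take_of_length_le
            simp
            omega
          rw [hall] at hm
          have := pvM_max pat (u ++ [c]) pat.length le_rfl (by rw [List.take_length]; exact hm)
          omega
      have ihm := ih (u ++ [c]) k0 out hqlt hnocc'
      simp only [List.length_append, List.length_cons, List.length_nil, List.append_assoc,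
        List.cons_append, List.nil_append] at ihm
      rw [show k0 + u.length + 1 = k0 + (u.length + 1) by omega]
      exact ihm

theorem pvRunR_zeros (pat : List Int) (hne : pat ≠ []) (fTab : List Nat) (d s : Nat) :
    ∀ (v : List Int) (k : Nat) (out : List Int), (∀ c ∈ v, c ≠ pat.getD 0 0) →
    pvRunR pat fTab d s v k 0 out = out := by
  intro v
  induction v with
  | nil => intro k out _; rfl
  | cons c v' ih =>
    intro k out h
    simp only [pvRunR]
    have hc : ¬ pat.getD 0 0 = c := fun hc => (h c (by simp)) hc.symm
    rw [show pvChain pat fTab c 0 0 = 0 from rfl, if_neg hc,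
      if_neg (by have := List.length_pos_iff.mpr hne; omega)]
    exact ih (k+1) out (fun x hx => h x (by simp [hx]))

theorem pvRunR_skip0 (pat : List Int) (hne : pat ≠ []) (fTab : List Nat) (d s : Nat) :
    ∀ (w v : List Int) (k : Nat) (out : List Int), (∀ c ∈ w, c ≠ pat.getD 0 0) →
    pvRunR pat fTab d s (w ++ v) k 0 out = pvRunR pat fTab d s v (k + w.length) 0 out := by
  intro w
  induction w with
  | nil => intro v k out _; simp
  | cons c w' ih =>
    intro v k out h
    rw [List.cons_append]
    simp only [pvRunR]
    have hc : ¬ pat.getD 0 0 = c := fun hc => (h c (by simp)) hc.symm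
    rw [show pvChain pat fTab c 0 0 = 0 from rfl, if_neg hc,
      if_neg (by have := List.length_pos_iff.mpr hne; omega)]
    rw [ih v (k+1) out (fun x hx => h x (by simp [hx]))]
    simp only [List.length_cons]
    ring_nf

theorem pvRunB_eq_runR (pat : List Int) (hne : pat ≠ []) (fTab : List Nat) (d s : Nat)
    (r : List Int) :
    ∀ (fuel k q : Nat) (out : List Int), r.length ≤ fuel + k →
    pvRunB pat fTab d s r fuel k q out = pvRunR pat fTab d s (r.drop k) k q out := by
  intro fuel
  induction fuel with
  | zero =>
    intro k q out hf
    rw [List.drop_eq_nil_iff.mpr (by omega)]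
    rfl
  | succ fuel ih =>
    intro k q out hf
    rw [pvRunB]
    by_cases hk : k < r.length
    · rw [if_pos hk]
      by_cases hq0 : q = 0
      · subst hq0
        rw [if_pos rfl]
        cases hidx : PySem.List.index? (r.drop k) (pat.getD 0 0) with
        | none =>
          have hnm : pat.getD 0 0 ∉ r.drop k := (PySem.List.index?_eq_none_iff _ _).mp hidx
          rw [pvRunR_zeros pat hne fTab d s _ k out (fun c hc hc' => hnm (hc' ▸ hc))]
          rfl
        | some j =>
          obtain ⟨hj, hjv, hjmin⟩ := PySem.List.getElem_of_index?_eq_some hidx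
          have hjk : k + j < r.length := by
            rw [List.length_drop] at hj
            omega
          have hdec : r.drop k = (r.drop k).take j ++ r.drop (k + j) := by
            conv_lhs => rw [← List.take_append_drop j (r.drop k)]
            rw [List.drop_drop]
          have hhead : r.drop (k + j) = pat.getD 0 0 :: r.drop (k + j + 1) := by
            rw [List.drop_eq_getElem_cons hjk]
            congr 1
            simpa using hjv
          have hw : ∀ c ∈ (r.drop k).take j, c ≠ pat.getD 0 0 := by
            intro c hc
            obtain ⟨i, hi, rfl⟩ := List.mem_iff_getElem.mp hc
            have hij : i < j := by
              have := List.length_take_le j (r.drop k)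
              simp only [List.length_take] at hi
              omega
            rw [List.getElem_take]
            exact hjmin i hij
          rw [hdec, pvRunR_skip0 pat hne fTab d s _ _ k out hw]
          have hltake : ((r.drop k).take j).length = j := by
            simp only [List.length_take, List.length_drop]
            omega
          rw [hltake, hhead]
          simp only [pvRunR, Option.map_some]
          rw [show pvChain pat fTab (pat.getD 0 0) 0 0 = 0 from rfl, if_pos rfl]
          simp only [Nat.zero_add]
          by_cases h1 : 1 = pat.length
          · rw [if_pos h1, if_pos h1]
            rw [ih (j + k + 1) 0 _ (by omega)]
            rw [show j + k = k + j by omega]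
          · rw [if_neg h1, if_neg h1]
            rw [ih (j + k + 1) 1 out (by omega)]
            rw [show j + k = k + j by omega]
      · rw [if_neg hq0]
        rw [List.drop_eq_getElem_cons hk]
        simp only [pvRunR]
        rw [List.getD_eq_getElem r 0 hk]
        by_cases h2 : (if pat.getD (pvChain pat fTab r[k] q q) 0 = r[k]
            then pvChain pat fTab r[k] q q + 1 else 0) = pat.length
        · rw [if_pos h2, if_pos h2, ih (k + 1) 0 _ (by omega)]
        · rw [if_neg h2, if_neg h2, ih (k + 1) _ out (by omega)]
    · rw [if_neg hk]
      rw [List.drop_eq_nil_iff.mpr (by omega)]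
      rfl

-- the incrementally built table equals the specification table
theorem pvChain_congr (pat : List Int) (c : Int) (f : List Nat) (q0 : Nat)
    (hq0 : q0 ≤ pat.length) (hf : ∀ i, i ≤ q0 → f.getD i 0 = pvBord pat i) :
    ∀ (fuel q : Nat), q ≤ q0 → pvChain pat f c fuel q = pvChain pat (pvFTab pat) c fuel q := by
  intro fuel
  induction fuel with
  | zero => intro q _; rfl
  | succ fuel ih =>
    intro q hq
    rw [pvChain, pvChain]
    by_cases h : 0 < q ∧ ¬ pat.getD q 0 = c
    · rw [if_pos h, if_pos h]
      have hb : pvBord pat q < q := pvBord_lt pat q h.1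
      rw [hf q hq, pvFTab_getD pat q (by omega)]
      exact ih (pvBord pat q) (by omega)
    · rw [if_neg h, if_neg h]

theorem pvSuffix_of_drop_one (v w : List Int) (h : v <:+ w.drop 1) : v <:+ w :=
  h.trans (List.drop_suffix 1 w)

theorem pvSuffix_drop_one (v w : List Int) (h : v <:+ w) (hl : v.length + 1 ≤ w.length) :
    v <:+ w.drop 1 := by
  have h2 := List.suffix_iff_eq_drop.mp h
  apply List.suffix_iff_eq_drop.mpr
  rw [List.length_drop, List.drop_drop]
  conv_lhs => rw [h2]
  congr 1
  omega

theorem pvM_drop1 (pat : List Int) (q : Nat) (h1 : 1 ≤ q) (hq : q ≤ pat.length) :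
    pvM pat ((pat.take q).drop 1) = pvBord pat q := by
  apply le_antisymm
  · have hs := pvM_suffix pat ((pat.take q).drop 1)
    have hlen := hs.length_le
    rw [List.length_drop, List.length_take, List.length_take] at hlen
    have hmle := pvM_le pat ((pat.take q).drop 1)
    have hmq : pvM pat ((pat.take q).drop 1) < q := by omega
    exact pvBord_max pat q hq _ hmq (pvSuffix_of_drop_one _ _ hs)
  · have hb : pvBord pat q < q := pvBord_lt pat q (by omega)
    apply pvM_max pat _ _ (by omega)
    apply pvSuffix_drop_one _ _ (pvBord_border pat q hq)
    rw [List.length_take, List.length_take]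
    omega

theorem pvBuild_inv (pat : List Int) :
    ∀ m, m + 1 ≤ pat.length →
    ((List.range' 1 m).foldl (fun ft q =>
        let t1 := pvChain pat ft.1 (pat.getD q 0) ft.2 ft.2
        let t2 := if pat.getD t1 0 = pat.getD q 0 then t1 + 1 else 0
        (ft.1.set (q + 1) t2, t2))
      (List.replicate (pat.length + 1) 0, 0)).1.length = pat.length + 1 ∧
    (∀ i, i ≤ m + 1 →
      ((List.range' 1 m).foldl (fun ft q =>
          let t1 := pvChain pat ft.1 (pat.getD q 0) ft.2 ft.2
          let t2 := if pat.getD t1 0 = pat.getD q 0 then t1 + 1 else 0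
          (ft.1.set (q + 1) t2, t2))
        (List.replicate (pat.length + 1) 0, 0)).1.getD i 0 = pvBord pat i) ∧
    ((List.range' 1 m).foldl (fun ft q =>
        let t1 := pvChain pat ft.1 (pat.getD q 0) ft.2 ft.2
        let t2 := if pat.getD t1 0 = pat.getD q 0 then t1 + 1 else 0
        (ft.1.set (q + 1) t2, t2))
      (List.replicate (pat.length + 1) 0, 0)).2 = pvBord pat (m + 1) := by
  intro m
  induction m with
  | zero =>
    intro _
    have hb1 : pvBord pat 1 = 0 := by have := pvBord_lt pat 1 one_pos; omega
    refine ⟨by simp [show List.range' 1 0 = [] from rfl], ?_, ?_⟩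
    · intro i hi
      simp only [show List.range' 1 0 = [] from rfl, List.foldl_nil]
      rw [List.getD_eq_getElem _ _ (by simp only [List.length_replicate]; omega),
        List.getElem_replicate]
      interval_cases i
      · rfl
      · exact hb1.symm
    · simp only [show List.range' 1 0 = [] from rfl, List.foldl_nil]
      exact hb1.symm
  | succ m ih =>
    intro hm
    have IH := ih (by omega)
    rw [show m + 1 = m + 1 from rfl, List.range'_concat]
    simp only [List.foldl_append, List.foldl_cons, List.foldl_nil, Nat.one_mul]
    obtain ⟨hlen, hget, ht⟩ := IH
    have hb : pvBord pat (m + 1) < m + 1 := pvBord_lt pat (m + 1) (by omega)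
    have hchain : pvChain pat
        ((List.range' 1 m).foldl (fun ft q =>
          let t1 := pvChain pat ft.1 (pat.getD q 0) ft.2 ft.2
          let t2 := if pat.getD t1 0 = pat.getD q 0 then t1 + 1 else 0
          (ft.1.set (q + 1) t2, t2)) (List.replicate (pat.length + 1) 0, 0)).1
          (pat.getD (1 + m) 0) (pvBord pat (m + 1)) (pvBord pat (m + 1))
        = pvChain pat (pvFTab pat) (pat.getD (1 + m) 0) (pvBord pat (m + 1)) (pvBord pat (m + 1)) :=
      pvChain_congr pat _ _ (m + 1) (by omega) hget _ _ (by omega)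
    have hMu : pvM pat ((pat.take (m + 1)).drop 1) = pvBord pat (m + 1) :=
      pvM_drop1 pat (m + 1) (by omega) (by omega)
    have hstep := pvStep_M pat ((pat.take (m + 1)).drop 1) (pat.getD (1 + m) 0)
      (by rw [hMu]; omega)
    rw [hMu] at hstep
    have happ : (pat.take (m + 1)).drop 1 ++ [pat.getD (1 + m) 0]
        = (pat.take (m + 2)).drop 1 := by
      rw [show m + 2 = (m + 1) + 1 from rfl, pvTake_succ pat (m + 1) (by omega)]
      rw [List.drop_append_of_le_length (by rw [List.length_take]; omega)]
      rw [show (1 + m) = (m + 1) from by omega]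
    rw [happ] at hstep
    have hM2 : pvM pat ((pat.take (m + 2)).drop 1) = pvBord pat (m + 2) :=
      pvM_drop1 pat (m + 2) (by omega) (by omega)
    rw [hM2] at hstep
    simp only [ht, hchain, hstep]
    refine ⟨by rw [List.length_set]; exact hlen, ?_, by first | rfl | trivial⟩
    intro i hi
    rcases Nat.lt_or_ge i (1 + m + 1) with hlt | hge
    · rw [List.getD_eq_getElem _ _ (by rw [List.length_set, hlen]; omega),
        List.getElem_set, if_neg (by omega)]
      rw [← List.getD_eq_getElem _ _ (by rw [hlen]; omega)]
      exact hget i (by omega)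
    · have hieq : i = 1 + m + 1 := by omega
      rw [hieq, List.getD_eq_getElem _ _ (by rw [List.length_set, hlen]; omega),
        List.getElem_set, if_pos rfl]
      rw [show 1 + m + 1 = m + 2 from by omega]

theorem pvFTabB_eq (pat : List Int) (hne : pat ≠ []) : pvFTabB pat = pvFTab pat := by
  have hL : 1 ≤ pat.length := List.length_pos_iff.mpr hne
  have INV := pvBuild_inv pat (pat.length - 1) (by omega)
  apply List.ext_getElem
  · simp only [pvFTab]
    unfold pvFTabB
    rw [INV.1]
    simp
  · intro i h1 h2
    unfold pvFTabB at h1 ⊢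
    rw [INV.1] at h1
    rw [← List.getD_eq_getElem _ 0 (by rw [INV.1]; omega)]
    rw [show pat.length - 1 + 1 = pat.length from by omega] at INV
    rw [INV.2.1 i (by omega)]
    simp only [pvFTab] at h2 ⊢
    rw [List.getElem_map, List.getElem_range]

theorem pvRunB_row (pat : List Int) (hne : pat ≠ []) (d s : Nat) (r : List Int) (out : List Int) :
    pvRunB pat (pvFTab pat) d s r r.length 0 0 out = pvNaive pat d s r 0 out := by
  rw [pvRunB_eq_runR pat hne (pvFTab pat) d s r r.length 0 0 out (by omega)]
  simp only [List.drop_zero]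
  have h0 : pvM pat [] = 0 := pvM_nil pat hne
  have := pvRunR_eq_naive pat hne d s r [] 0 out
    (by rw [h0]; exact List.length_pos_iff.mpr hne)
    (by intro m hm; simp at hm; exact hne hm)
  simpa [h0] using this

-- ===== VERDICT (by name: the statement is the Claim_ definition above) =====
theorem particle_filter_spec : Claim_equal_particle_filter := by
  intro states particle_list _hdom hpre
  unfold Spec_particle_filter
  unfold particle_filter particle_filter_alt
  simp only [List.foldl_map]
  apply List.map_congr_left
  intro row _hrow
  apply PySem.List.foldl_congr_mem
  intro fr p hp
  have hne3 : p.2.1 ++ p.2.2.1 ++ p.2.2.2.1 ≠ ([] : List Int) := hpre.2 p hp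
  have hne : p.2.1 ++ p.2.1 ++ p.2.2.1 ++ p.2.2.2.1 ++ p.2.2.2.1 ≠ ([] : List Int) := by
    intro hc; apply hne3; simp at hc ⊢; tauto
  rw [pvFTabB_eq _ hne, pvRunB_row _ hne]
  have := pvScanA_eq_naive row (p.2.1 ++ p.2.1 ++ p.2.2.1 ++ p.2.2.2.1 ++ p.2.2.2.1)
    p.2.1.length (p.2.1.length + p.2.2.1.length + p.2.2.2.1.length)
    (((PySem.List.pyGet? states 0).getD []).length) hne
    ((((PySem.List.pyGet? states 0).getD []).length) + 1) 0 fr (by omega)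
  simp only [Nat.cast_zero, List.drop_zero] at this
  rw [show ((p.2.1 ++ p.2.2.1 ++ p.2.2.2.1).length : Int)
      = ((p.2.1.length + p.2.2.1.length + p.2.2.2.1.length : Nat) : Int) by push_cast [List.length_append]; ring]
  exact this
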